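-- pv_equiv track=rewrite | github.com/wewe231223/2DGP_Programing_Project | eagle.py | image_pivot
-- ===== SOURCE A (Python) =====
-- ImageSize = {
--     0:38,
--     1:41,
--     2:40,
--     3:43,
--     4:40,
--     5:43,
--     6:43,
--     7:42,
--     8:41,
--     9:40,
--     10:41,
--     11:43,
--     12:42,
--     13:41
-- }
--
-- def image_pivot(frame):
--     s = 0
--     f = 0
--     for k, v in ImageSize.items():
--         if f == frame : return s
--         s += v
--         f += 1
--
--     return s
-- ===== SOURCE B (Python) =====
-- ImageSize = {
--     0:38,
--     1:41,
--     2:40,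
--     3:43,
--     4:40,
--     5:43,
--     6:43,
--     7:42,
--     8:41,
--     9:40,
--     10:41,
--     11:43,
--     12:42,
--     13:41
-- }
--
-- # Built once at module load: prefix[k] = sum of sizes of frames before k; _TOTAL = full sum.
-- _PREFIX = {}
-- _TOTAL = 0
-- for _k, _v in ImageSize.items():
--     _PREFIX[_k] = _TOTAL
--     _TOTAL += _v
--
-- def image_pivot(frame):
--     return _PREFIX.get(frame, _TOTAL)
-- ===== Notes on version B (the rewrite author's own statement) =====
-- stated objective: simpler
-- what changed: Replaces the per-call early-return loop over ImageSize with a prefix-sum dict built once at module load, so image_pivot is a single dict lookup with the total as default.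
import Mathlib
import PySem

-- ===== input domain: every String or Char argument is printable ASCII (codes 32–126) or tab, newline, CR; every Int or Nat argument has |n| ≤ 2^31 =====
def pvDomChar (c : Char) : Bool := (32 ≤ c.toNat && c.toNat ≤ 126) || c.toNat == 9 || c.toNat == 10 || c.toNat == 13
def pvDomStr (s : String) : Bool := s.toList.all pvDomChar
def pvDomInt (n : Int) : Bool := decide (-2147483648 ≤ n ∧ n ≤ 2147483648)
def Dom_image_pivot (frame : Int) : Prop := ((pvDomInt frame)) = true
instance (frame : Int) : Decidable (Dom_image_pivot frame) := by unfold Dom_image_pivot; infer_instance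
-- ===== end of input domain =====

-- B replaces A's per-call early-return loop with a prefix-sum dict built once; one lookup per call (objective: simpler).

-- ===== PORT A =====
def ImageSizeA : List (Int × Int) :=
  [(0,38),(1,41),(2,40),(3,43),(4,40),(5,43),(6,43),(7,42),(8,41),(9,40),(10,41),(11,43),(12,42),(13,41)]

-- the for-loop with early return, state (s, f)
def loopA : List (Int × Int) → Int → Int → Int → Int
  | [], s, _, _ => s
  | (_, v) :: rest, s, f, frame => if f = frame then s else loopA rest (s + v) (f + 1) frame

def image_pivot (frame : Int) : Int := loopA ImageSizeA 0 0 frame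

-- ===== PORT B =====
-- module-load loop: running total, prefix[k] = total before adding ImageSize[k]
def pvBuild : PySem.Dict Int Int × Int :=
  ImageSizeA.foldl
    (fun (acc : PySem.Dict Int Int × Int) (kv : Int × Int) =>
      (acc.1.insert kv.1 acc.2, acc.2 + kv.2))
    (PySem.Dict.mk [], 0)

def image_pivot_alt (frame : Int) : Int := (pvBuild.1).getD frame pvBuild.2

-- ===== PRECONDITION & SPEC =====
def Spec_image_pivot (frame : Int) (out : Int) : Prop := out = image_pivot_alt frame
instance (frame : Int) (out : Int) : Decidable (Spec_image_pivot frame out) := by unfold Spec_image_pivot; infer_instance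

-- ===== CLAIM (what is proved, stated in full; the proofs are below) =====
def Claim_equal_image_pivot : Prop := ∀ (frame : Int), Dom_image_pivot frame → Spec_image_pivot frame (image_pivot frame)

-- ===== LEMMAS AND PROOFS =====
set_option maxHeartbeats 1000000 in
theorem image_pivot_eq (frame : Int) : image_pivot frame = image_pivot_alt frame := by
  by_cases h0 : frame = 0
  · subst h0; decide
  by_cases h1 : frame = 1
  · subst h1; decide
  by_cases h2 : frame = 2
  · subst h2; decide
  by_cases h3 : frame = 3
  · subst h3; decide
  by_cases h4 : frame = 4
  · subst h4; decide
  by_cases h5 : frame = 5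
  · subst h5; decide
  by_cases h6 : frame = 6
  · subst h6; decide
  by_cases h7 : frame = 7
  · subst h7; decide
  by_cases h8 : frame = 8
  · subst h8; decide
  by_cases h9 : frame = 9
  · subst h9; decide
  by_cases h10 : frame = 10
  · subst h10; decide
  by_cases h11 : frame = 11
  · subst h11; decide
  by_cases h12 : frame = 12
  · subst h12; decide
  by_cases h13 : frame = 13
  · subst h13; decide
  -- frame matches no key: A's loop runs to the end (578); B's lookup misses and falls back to the total
  simp [image_pivot, image_pivot_alt, loopA, ImageSizeA, pvBuild,
    PySem.Dict.getD, PySem.Dict.insert, PySem.Dict.get?,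
    Ne.symm h0, Ne.symm h1, Ne.symm h2, Ne.symm h3, Ne.symm h4, Ne.symm h5, Ne.symm h6,
    Ne.symm h7, Ne.symm h8, Ne.symm h9, Ne.symm h10, Ne.symm h11, Ne.symm h12, Ne.symm h13]

-- ===== VERDICT (by name: the statement is the Claim_ definition above) =====
theorem image_pivot_spec : Claim_equal_image_pivot := by
  intro frame _
  exact image_pivot_eq frame
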